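-- pv_equiv track=rewrite | github.com/lizhi-001/yunke | experiments/run_highdim_mgrid_multiseed.py | allocate_job_budgets
-- ===== SOURCE A (Python) =====
-- from typing import Any, Dict, List, Sequence, Tuple
--
-- def allocate_job_budgets(total_jobs: int, slot_count: int) -> List[int]:
--     total_jobs = max(1, int(total_jobs))
--     slot_count = max(1, int(slot_count))
--     budgets = [1] * slot_count
--     if total_jobs <= slot_count:
--         return budgets
--     extra = total_jobs - slot_count
--     idx = 0
--     while extra > 0:
--         budgets[idx % slot_count] += 1
--         extra -= 1
--         idx += 1
--     return budgets
-- ===== SOURCE B (Python) =====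
-- def allocate_job_budgets(total_jobs, slot_count):
--     total_jobs = max(1, int(total_jobs))
--     slot_count = max(1, int(slot_count))
--     q, r = divmod(max(0, total_jobs - slot_count), slot_count)
--     return [q + 2] * r + [q + 1] * (slot_count - r)
-- ===== Notes on version B (the rewrite author's own statement) =====
-- stated objective: simpler
-- what changed: Replaces A's per-extra-job round-robin while-loop with a closed-form divmod: the first extra%slot_count slots get extra//slot_count+2 jobs and the rest extra//slot_count+1, built directly by list repetition.
import Mathlib
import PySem

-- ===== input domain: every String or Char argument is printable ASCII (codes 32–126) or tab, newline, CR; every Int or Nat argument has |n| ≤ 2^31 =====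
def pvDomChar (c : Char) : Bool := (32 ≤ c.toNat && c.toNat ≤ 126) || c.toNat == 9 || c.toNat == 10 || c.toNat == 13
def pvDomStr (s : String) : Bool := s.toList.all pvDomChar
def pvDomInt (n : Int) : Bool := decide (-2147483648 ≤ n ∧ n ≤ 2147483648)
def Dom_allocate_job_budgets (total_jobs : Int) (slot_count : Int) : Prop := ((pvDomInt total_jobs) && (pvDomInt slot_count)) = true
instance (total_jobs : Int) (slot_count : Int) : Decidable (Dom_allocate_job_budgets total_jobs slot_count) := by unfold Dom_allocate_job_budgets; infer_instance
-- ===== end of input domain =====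

-- B replaces A's round-robin while-loop (one iteration per extra job) by a closed-form divmod allocation (objective: simpler).

-- ===== PORT A =====
-- the 'while extra > 0' loop of A, state (budgets, extra, idx), one recursive call per iteration
def pvLoopA (S : Int) (budgets : List Int) (extra idx : Int) : List Int :=
  if h : 0 < extra then
    pvLoopA S (budgets.set (PySem.Int.mod idx S).toNat
                 (budgets.getD (PySem.Int.mod idx S).toNat 0 + 1))
      (extra - 1) (idx + 1)
  else budgets
termination_by extra.toNat
decreasing_by omega

def allocate_job_budgets (total_jobs : Int) (slot_count : Int) : List Int :=
  let T := max 1 total_jobs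
  let S := max 1 slot_count
  let budgets := List.replicate S.toNat 1
  if T ≤ S then budgets
  else pvLoopA S budgets (T - S) 0

-- ===== PORT B =====
def allocate_job_budgets_alt (total_jobs : Int) (slot_count : Int) : List Int :=
  let T := max 1 total_jobs
  let S := max 1 slot_count
  let q := PySem.Int.floordiv (max 0 (T - S)) S
  let r := PySem.Int.mod (max 0 (T - S)) S
  List.replicate r.toNat (q + 2) ++ List.replicate (S - r).toNat (q + 1)

-- ===== PRECONDITION & SPEC =====
def Spec_allocate_job_budgets (total_jobs : Int) (slot_count : Int) (out : List Int) : Prop := out = allocate_job_budgets_alt total_jobs slot_count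
instance (total_jobs : Int) (slot_count : Int) (out : List Int) : Decidable (Spec_allocate_job_budgets total_jobs slot_count out) := by unfold Spec_allocate_job_budgets; infer_instance

-- ===== CLAIM (what is proved, stated in full; the proofs are below) =====
def Claim_equal_allocate_job_budgets : Prop := ∀ (total_jobs : Int) (slot_count : Int), Dom_allocate_job_budgets total_jobs slot_count → Spec_allocate_job_budgets total_jobs slot_count (allocate_job_budgets total_jobs slot_count)

-- ===== LEMMAS AND PROOFS =====

-- number of loop steps among the next n (starting at running index idx) that hit slot j
def pvCnt (S : Int) (n : Nat) (idx : Int) (j : Nat) : Int :=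
  match n with
  | 0 => 0
  | Nat.succ m => (if (PySem.Int.mod idx S).toNat = j then 1 else 0) + pvCnt S m (idx + 1) j

lemma pvLoopA_length (S : Int) : ∀ (n : Nat) (e : Int), e.toNat = n → ∀ (b : List Int) (i : Int),
    (pvLoopA S b e i).length = b.length := by
  intro n
  induction n with
  | zero => intro e he b i; rw [pvLoopA]; simp [show ¬ 0 < e by omega]
  | succ m ih =>
    intro e he b i
    rw [pvLoopA]
    simp only [show 0 < e by omega, dite_true]
    rw [ih (e - 1) (by omega)]
    simp

lemma pvLoopA_getD (S : Int) (hS : 0 < S) : ∀ (n : Nat) (e : Int), e.toNat = n →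
    ∀ (b : List Int) (i : Int) (j : Nat), j < b.length → b.length = S.toNat →
    (pvLoopA S b e i).getD j 0 = b.getD j 0 + pvCnt S n i j := by
  intro n
  induction n with
  | zero => intro e he b i j hj hb; rw [pvLoopA]; simp [show ¬ 0 < e by omega, pvCnt]
  | succ m ih =>
    intro e he b i j hj hb
    have hp : (PySem.Int.mod i S).toNat < b.length := by
      have h1 := PySem.Int.mod_nonneg i hS
      have h2 := PySem.Int.mod_lt i hS
      omega
    rw [pvLoopA]
    simp only [show 0 < e by omega, dite_true]
    rw [ih (e - 1) (by omega) _ _ j (by simpa using hj) (by simpa using hb)]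
    simp only [pvCnt]
    by_cases hpj : (PySem.Int.mod i S).toNat = j
    · subst hpj
      rw [List.getD_eq_getElem _ _ (show _ < (b.set _ _).length by simpa using hp),
        List.getElem_set_self, List.getD_eq_getElem _ _ hp]
      simp only [if_true]
      ring
    · rw [List.getD_eq_getElem _ _ (show _ < (b.set _ _).length by simpa using hj),
        List.getElem_set_ne hpj]
      rw [List.getD_eq_getElem _ _ hj]
      simp [hpj]

lemma pv_emod_sub_eq_zero_iff (S a b : Int) (_hS : 0 < S) (ha : 0 ≤ a) (haS : a < S)
    (hb : 0 ≤ b) (hbS : b < S) : (a - b) % S = 0 ↔ a = b := by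
  by_cases h : b ≤ a
  · rw [Int.emod_eq_of_lt (by omega) (by omega)]; omega
  · have h1 : a - b = (a - b + S) + S * (-1) := by ring
    rw [h1, Int.add_mul_emod_self_left, Int.emod_eq_of_lt (by omega) (by omega)]
    omega

-- closed form: among n steps starting at idx ≥ 0, slot j (j < S) is hit (n + S - 1 - (j - idx) % S) / S times
lemma pvCnt_closed (S : Int) (hS : 0 < S) : ∀ (n : Nat) (idx : Int), 0 ≤ idx →
    ∀ (j : Nat), (j : Int) < S →
    pvCnt S n idx j = ((n : Int) + S - 1 - ((j : Int) - idx) % S) / S := by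
  intro n
  induction n with
  | zero =>
    intro idx hidx j hj
    have h1 : 0 ≤ ((j : Int) - idx) % S := Int.emod_nonneg _ (by omega)
    have h2 : ((j : Int) - idx) % S < S := Int.emod_lt_of_pos _ hS
    simp only [pvCnt, Nat.cast_zero]
    rw [Int.ediv_eq_zero_of_lt (by omega) (by omega)]
  | succ m ih =>
    intro idx hidx j hj
    have hj0 : (0 : Int) ≤ (j : Int) := Int.natCast_nonneg j
    have hjm : (j : Int) % S = (j : Int) := Int.emod_eq_of_lt hj0 hj
    have hd1 : 0 ≤ ((j : Int) - idx) % S := Int.emod_nonneg _ (by omega)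
    have hd2 : ((j : Int) - idx) % S < S := Int.emod_lt_of_pos _ hS
    set d : Int := ((j : Int) - idx) % S with hd
    have hmod : PySem.Int.mod idx S = idx % S := PySem.Int.mod_eq_emod_of_pos hS
    have hi1 : 0 ≤ idx % S := Int.emod_nonneg _ (by omega)
    have hi2 : idx % S < S := Int.emod_lt_of_pos _ hS
    have hkey : d = ((j : Int) - idx % S) % S := by rw [hd, Int.sub_emod, hjm]
    have hcond : ((PySem.Int.mod idx S).toNat = j) ↔ d = 0 := by
      rw [hmod, hkey]
      rw [pv_emod_sub_eq_zero_iff S _ _ hS hj0 hj hi1 hi2]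
      omega
    have hx := Int.mul_ediv_add_emod ((j : Int) - idx) S
    have hstep : ((j : Int) - (idx + 1)) % S = (d - 1) % S := by
      have heq : (j : Int) - (idx + 1) = (d - 1) + S * (((j : Int) - idx) / S) := by
        rw [hd]; linarith [hx]
      rw [heq, Int.add_mul_emod_self_left]
    simp only [pvCnt]
    rw [ih (idx + 1) (by omega) j hj, hstep]
    by_cases h0 : d = 0
    · rw [if_pos (hcond.mpr h0)]
      have hm1 : (d - 1) % S = S - 1 := by
        have : d - 1 = (S - 1) + S * (-1) := by omega
        rw [this, Int.add_mul_emod_self_left, Int.emod_eq_of_lt (by omega) (by omega)]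
      rw [hm1, h0]
      have e1 : (m : Int) + S - 1 - (S - 1) = (m : Int) := by ring
      have e2 : ((m : Int) + 1) + S - 1 - 0 = (m : Int) + 1 * S := by ring
      rw [e1]
      push_cast
      rw [e2, Int.add_mul_ediv_right _ _ (by omega : S ≠ 0)]
      ring
    · rw [if_neg (by rw [hcond]; exact h0)]
      have hm1 : (d - 1) % S = d - 1 := Int.emod_eq_of_lt (by omega) (by omega)
      rw [hm1]
      push_cast
      have : (m : Int) + S - 1 - (d - 1) = (m : Int) + 1 + S - 1 - d := by ring
      rw [this, zero_add]

theorem allocate_job_budgets_spec_aux (total_jobs slot_count : Int) :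
    allocate_job_budgets total_jobs slot_count = allocate_job_budgets_alt total_jobs slot_count := by
  unfold allocate_job_budgets allocate_job_budgets_alt
  dsimp only
  set T := max 1 total_jobs with hT
  set S := max 1 slot_count with hS
  have hS0 : 0 < S := by omega
  by_cases h : T ≤ S
  · rw [if_pos h]
    have he : max 0 (T - S) = 0 := by omega
    rw [he]
    have hq : PySem.Int.floordiv 0 S = 0 := by
      rw [PySem.Int.floordiv_eq_ediv_of_pos hS0]; simp
    have hr : PySem.Int.mod 0 S = 0 := by
      rw [PySem.Int.mod_eq_emod_of_pos hS0]; simp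
    rw [hq, hr]
    simp
  · rw [if_neg h]
    set e : Int := T - S with heq
    have he0 : 0 < e := by omega
    have hemax : max 0 (T - S) = e := by omega
    rw [hemax]
    have hq : PySem.Int.floordiv e S = e / S := PySem.Int.floordiv_eq_ediv_of_pos hS0
    have hr : PySem.Int.mod e S = e % S := PySem.Int.mod_eq_emod_of_pos hS0
    rw [hq, hr]
    set q : Int := e / S with hqq
    set r : Int := e % S with hrr
    have hr1 : 0 ≤ r := Int.emod_nonneg _ (by omega)
    have hr2 : r < S := Int.emod_lt_of_pos _ hS0
    have hdm : S * q + r = e := Int.mul_ediv_add_emod e S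
    have hq0 : 0 ≤ q := by
      by_contra hc
      have : q ≤ -1 := by omega
      nlinarith
    have hlen : (pvLoopA S (List.replicate S.toNat 1) e 0).length = S.toNat := by
      rw [pvLoopA_length S e.toNat e rfl]; simp
    apply List.ext_getElem
    · simp [hlen]; omega
    · intro j hj1 hj2
      have hjS : j < S.toNat := by simpa [hlen] using hj1
      have hjS' : (j : Int) < S := by omega
      rw [← List.getD_eq_getElem _ 0 hj1]
      rw [pvLoopA_getD S hS0 e.toNat e rfl _ 0 j (by simpa using hjS) (by simp)]
      rw [pvCnt_closed S hS0 e.toNat 0 le_rfl j hjS']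
      have hjm : ((j : Int) - 0) % S = (j : Int) :=
        by rw [sub_zero]; exact Int.emod_eq_of_lt (Int.natCast_nonneg j) hjS'
      rw [hjm]
      have hcast : ((e.toNat : Int)) = e := by omega
      rw [hcast]
      have hgetD : (List.replicate S.toNat (1 : Int)).getD j 0 = 1 := by
        rw [List.getD_eq_getElem _ _ (by simpa using hjS)]; simp
      rw [hgetD]
      by_cases hjr : (j : Int) < r
      · rw [List.getElem_append_left (by simp; omega), List.getElem_replicate]
        have hsplit : e + S - 1 - (j : Int) = (r - 1 - (j : Int)) + S * (q + 1) := by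
          rw [← hdm]; ring
        rw [hsplit, Int.add_mul_ediv_left _ _ (by omega : S ≠ 0),
          Int.ediv_eq_zero_of_lt (by omega) (by omega)]
        ring
      · rw [List.getElem_append_right (by simp; omega), List.getElem_replicate]
        have hsplit : e + S - 1 - (j : Int) = (r + S - 1 - (j : Int)) + S * q := by
          rw [← hdm]; ring
        rw [hsplit, Int.add_mul_ediv_left _ _ (by omega : S ≠ 0),
          Int.ediv_eq_zero_of_lt (by omega) (by omega)]
        ring

-- ===== VERDICT (by name: the statement is the Claim_ definition above) =====
theorem allocate_job_budgets_spec : Claim_equal_allocate_job_budgets := by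
  intro t s _
  exact allocate_job_budgets_spec_aux t s
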